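-- pv_equiv track=rewrite | github.com/Dmitriuso/translate_fnet_github | utils/utils.py | split_trg
-- ===== SOURCE A (Python) =====
-- def split_trg(sentence):
--     splitted_list = []
--     j = 0
--     for i, s in enumerate(sentence):
--         if s in ['.', ':', ';', '-', '?', '!', ",", "'"]:
--             splitted_list.append(sentence[j:i])
--             splitted_list.append(s)
--             j = i+1
--         elif s == " ":
--             splitted_list.append(sentence[j:i])
--             j = i+1
--     splitted_list = [s for s in splitted_list if s not in ['', ' ', None]]
--     return splitted_list
-- ===== SOURCE B (Python) =====
-- def split_trg(sentence):
--     out = []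
--     buf = []
--     for ch in sentence:
--         if ch in ".:;-?!,'":
--             if buf:
--                 out.append(''.join(buf))
--                 buf = []
--             out.append(ch)
--         elif ch == ' ':
--             if buf:
--                 out.append(''.join(buf))
--                 buf = []
--         else:
--             buf.append(ch)
--     return out
-- ===== Notes on version B (the rewrite author's own statement) =====
-- stated objective: simpler
-- what changed: Replaces A's index-tracking loop with string slicing plus a second filtering pass by a single-pass character-accumulator tokenizer that flushes the buffer at delimiters, needing no slices and no post-filter.
import Mathlib
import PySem

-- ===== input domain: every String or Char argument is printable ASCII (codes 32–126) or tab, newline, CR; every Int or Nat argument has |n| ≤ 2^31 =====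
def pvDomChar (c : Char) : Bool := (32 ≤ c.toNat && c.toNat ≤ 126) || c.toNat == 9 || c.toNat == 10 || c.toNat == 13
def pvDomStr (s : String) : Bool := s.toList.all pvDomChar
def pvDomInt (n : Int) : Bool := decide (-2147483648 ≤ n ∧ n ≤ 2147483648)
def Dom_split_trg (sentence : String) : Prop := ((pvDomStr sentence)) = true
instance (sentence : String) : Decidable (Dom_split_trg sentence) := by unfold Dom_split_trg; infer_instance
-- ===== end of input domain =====

-- B replaces A's index/slice loop + post-filter by a one-pass buffer-flushing tokenizer (simpler; same return value).

-- ===== PORT A =====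
-- `s not in ['', ' ', None]` of the final comprehension (a string is never None)
def pvOkTok (t : String) : Bool := !(t == "" || t == " ")

-- the for-loop of A as structural recursion over the remaining characters; state = (splitted_list, j), i the running index.
-- sentence[j:i] on a string is String.ofList of the slice of its character list (exact).
def splitTrgLoopA (cs : List Char) : List Char → Int → List String × Int → List String × Int
  | [], _, acc => acc
  | s :: rest, i, (lst, j) =>
    if s ∈ ['.', ':', ';', '-', '?', '!', ',', '\''] then
      splitTrgLoopA cs rest (i + 1)
        (lst ++ [String.ofList (PySem.List.slice cs (some j) (some i)), String.ofList [s]], i + 1)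
    else if s = ' ' then
      splitTrgLoopA cs rest (i + 1)
        (lst ++ [String.ofList (PySem.List.slice cs (some j) (some i))], i + 1)
    else
      splitTrgLoopA cs rest (i + 1) (lst, j)

def split_trg (sentence : String) : List String :=
  ((splitTrgLoopA sentence.toList sentence.toList 0 ([], 0)).1).filter pvOkTok

-- ===== PORT B =====
-- one pass, accumulating the current word in buf; flush on delimiter/space; trailing buf never emitted.
def splitTrgLoopB : List Char → List Char → List String
  | [], _ => []
  | c :: rest, buf =>
    if c ∈ ['.', ':', ';', '-', '?', '!', ',', '\''] then
      (if buf.isEmpty then [] else [String.ofList buf]) ++ String.ofList [c] :: splitTrgLoopB rest []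
    else if c = ' ' then
      (if buf.isEmpty then [] else [String.ofList buf]) ++ splitTrgLoopB rest []
    else
      splitTrgLoopB rest (buf ++ [c])

def split_trg_alt (sentence : String) : List String :=
  splitTrgLoopB sentence.toList []

-- ===== PRECONDITION & SPEC =====
def Spec_split_trg (sentence : String) (out : List String) : Prop := out = split_trg_alt sentence
instance (sentence : String) (out : List String) : Decidable (Spec_split_trg sentence out) := by unfold Spec_split_trg; infer_instance

-- ===== CLAIM (what is proved, stated in full; the proofs are below) =====
def Claim_equal_split_trg : Prop := ∀ (sentence : String), Dom_split_trg sentence → Spec_split_trg sentence (split_trg sentence)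

-- ===== LEMMAS AND PROOFS =====

theorem pvSliceMid (pre buf rest : List Char) :
    PySem.List.slice (pre ++ buf ++ rest) (some ((pre.length : Nat) : Int))
      (some (((pre.length + buf.length : Nat) : Nat) : Int)) = buf := by
  rw [List.append_assoc, PySem.List.slice_natCast]
  simp

theorem pvOk_ofList (l : List Char) (h : ' ' ∉ l) :
    pvOkTok (String.ofList l) = !l.isEmpty := by
  cases l with
  | nil => decide
  | cons a t =>
    simp only [pvOkTok, List.isEmpty_cons]
    have h1 : String.ofList (a :: t) ≠ "" := by
      intro he
      have := congrArg String.toList he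
      simp at this
    have h2 : String.ofList (a :: t) ≠ " " := by
      intro he
      have := congrArg String.toList he
      simp at this
      exact h (this.1 ▸ List.mem_cons_self ..)
    simp [h1, h2]

theorem pvLoopA_filter (rest : List Char) : ∀ (pre buf : List Char) (lst : List String),
    (' ' ∉ buf) →
    ((splitTrgLoopA (pre ++ buf ++ rest) rest (((pre.length + buf.length : Nat) : Int))
        (lst, ((pre.length : Nat) : Int))).1).filter pvOkTok
      = lst.filter pvOkTok ++ splitTrgLoopB rest buf := by
  induction rest with
  | nil =>
    intro pre buf lst h
    simp [splitTrgLoopA, splitTrgLoopB]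
  | cons c rest ih =>
    intro pre buf lst h
    by_cases hc : c ∈ ['.', ':', ';', '-', '?', '!', ',', '\'']
    · have hcs : c ≠ ' ' := by rintro rfl; revert hc; decide
      rw [splitTrgLoopA, if_pos hc]
      have e := ih (pre ++ buf ++ [c]) [] (lst ++ [String.ofList (PySem.List.slice (pre ++ buf ++ c :: rest) (some ((pre.length : Nat) : Int)) (some (((pre.length + buf.length : Nat) : Nat) : Int))), String.ofList [c]]) (by simp)
      rw [show pre ++ buf ++ [c] ++ [] ++ rest = pre ++ buf ++ c :: rest by simp] at e
      rw [show ((((pre ++ buf ++ [c]).length + ([] : List Char).length : Nat)) : Int) = ((pre.length + buf.length : Nat) : Int) + 1 by push_cast; simp; ring] at e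
      rw [show ((((pre ++ buf ++ [c]).length : Nat)) : Int) = ((pre.length + buf.length : Nat) : Int) + 1 by push_cast; simp; ring] at e
      rw [e]
      have hok : pvOkTok (String.ofList [c]) = true := by
        rw [pvOk_ofList [c] (by simp; exact fun hh => hcs hh.symm)]; rfl
      rw [pvSliceMid pre buf (c :: rest)]
      simp only [splitTrgLoopB, if_pos hc, List.filter_append, List.filter_cons, hok,
        pvOk_ofList buf h, List.filter_nil, List.append_assoc]
      cases hb : buf.isEmpty <;> simp
    · rw [splitTrgLoopA, if_neg hc]
      by_cases hsp : c = ' '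
      · rw [if_pos hsp]
        have e := ih (pre ++ buf ++ [c]) [] (lst ++ [String.ofList (PySem.List.slice (pre ++ buf ++ c :: rest) (some ((pre.length : Nat) : Int)) (some (((pre.length + buf.length : Nat) : Nat) : Int)))]) (by simp)
        rw [show pre ++ buf ++ [c] ++ [] ++ rest = pre ++ buf ++ c :: rest by simp] at e
        rw [show ((((pre ++ buf ++ [c]).length + ([] : List Char).length : Nat)) : Int) = ((pre.length + buf.length : Nat) : Int) + 1 by push_cast; simp; ring] at e
        rw [show ((((pre ++ buf ++ [c]).length : Nat)) : Int) = ((pre.length + buf.length : Nat) : Int) + 1 by push_cast; simp; ring] at e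
        rw [e, pvSliceMid pre buf (c :: rest)]
        simp only [splitTrgLoopB, if_neg hc, if_pos hsp, List.filter_append, List.filter_cons,
          pvOk_ofList buf h, List.filter_nil, List.append_assoc]
        cases hb : buf.isEmpty <;> simp
      · rw [if_neg hsp]
        have e := ih pre (buf ++ [c]) lst (by simp [h]; exact fun hh => hsp hh.symm)
        rw [show pre ++ (buf ++ [c]) ++ rest = pre ++ buf ++ c :: rest by simp] at e
        rw [show (((pre.length + (buf ++ [c]).length : Nat)) : Int) = ((pre.length + buf.length : Nat) : Int) + 1 by push_cast; simp; ring] at e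
        rw [e]
        simp [splitTrgLoopB, hc, hsp]

-- ===== VERDICT (by name: the statement is the Claim_ definition above) =====
theorem split_trg_spec : Claim_equal_split_trg := by
  intro sentence _
  unfold Spec_split_trg split_trg split_trg_alt
  have e := pvLoopA_filter sentence.toList [] [] [] (by simp)
  simpa using e
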